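-- pv_equiv track=rewrite | github.com/haydlite/sentence_embeddings | compare.py | lst_to_snippets
-- ===== SOURCE A (Python) =====
-- def lst_to_snippets(lst):
--   snippets = []
--   for article in lst:
--     s = ''
--     for bit in article.split():
--       if bit != '...':
--         s += bit + ' '
--       else:
--         snippets.append(s)
--         s = ''
--     snippets.append(s)
--   return snippets
-- ===== SOURCE B (Python) =====
-- def lst_to_snippets(lst):
--     snippets = []
--     for article in lst:
--         toks = article.split()
--         while '...' in toks:
--             i = toks.index('...')
--             snippets.append(''.join(t + ' ' for t in toks[:i]))
--             toks = toks[i + 1:]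
--         snippets.append(''.join(t + ' ' for t in toks))
--     return snippets
-- ===== Notes on version B (the rewrite author's own statement) =====
-- stated objective: alternative
-- what changed: Replaced A's token-streaming accumulate-and-flush loop (string accumulator reset at each '...') by a find-and-slice decomposition: repeatedly locate the next '...' with list.index, join the sliced segment's tokens, and continue after the cut.
import Mathlib
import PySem

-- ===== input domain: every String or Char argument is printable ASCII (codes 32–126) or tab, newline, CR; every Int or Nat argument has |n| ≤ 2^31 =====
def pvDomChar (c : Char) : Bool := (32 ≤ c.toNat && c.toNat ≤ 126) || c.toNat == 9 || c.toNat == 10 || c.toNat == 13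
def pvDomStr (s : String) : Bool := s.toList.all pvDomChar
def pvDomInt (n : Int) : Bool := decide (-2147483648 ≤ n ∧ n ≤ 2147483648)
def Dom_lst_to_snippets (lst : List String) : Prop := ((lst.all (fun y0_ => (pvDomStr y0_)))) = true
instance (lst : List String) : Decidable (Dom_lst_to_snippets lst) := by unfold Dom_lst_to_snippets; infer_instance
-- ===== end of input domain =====

-- B replaces A's token-streaming accumulate-and-flush loop by repeatedly locating the
-- next '...' with index and slicing the segment out (find-and-slice decomposition);
-- objective: alternative decomposition, same asymptotic cost.

-- ===== PORT A =====
-- the body of A's inner loop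
def pvStepBit (p : List String × String) (bit : String) : List String × String :=
  if bit ≠ "..." then (p.1, p.2 ++ bit ++ " ") else (p.1 ++ [p.2], "")

def lst_to_snippets (lst : List String) : List String :=
  lst.foldl (fun snippets article =>
    let r := (PySem.Str.split₀ article).foldl pvStepBit (snippets, "")
    r.1 ++ [r.2]) []

-- ===== PORT B =====
-- ''.join(t + ' ' for t in g)
def pvRender (g : List String) : String :=
  g.foldl (fun s t => s ++ t ++ " ") ""

-- the while-loop of Source B: find first '...', emit the slice before it, continue after it
def pvSegsB (toks : List String) : List String :=
  match h : PySem.List.index? toks "..." with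
  | some i =>
      pvRender (PySem.List.slice toks (some 0) (some (i : Int))) ::
        pvSegsB (PySem.List.slice toks (some ((i : Int) + 1)) (some (toks.length : Int)))
  | none => [pvRender toks]
termination_by toks.length
decreasing_by
  obtain ⟨hk, _, _⟩ := PySem.List.getElem_of_index?_eq_some h
  have : ((i : Int) + 1) = ((i + 1 : Nat) : Int) := by push_cast; ring
  rw [this, PySem.List.slice_natCast]
  simp only [List.length_take, List.length_drop]
  omega

def lst_to_snippets_alt (lst : List String) : List String :=
  lst.foldl (fun snippets article => snippets ++ pvSegsB (PySem.Str.split₀ article)) []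

-- ===== PRECONDITION & SPEC =====
def Spec_lst_to_snippets (lst : List String) (out : List String) : Prop := out = lst_to_snippets_alt lst
instance (lst : List String) (out : List String) : Decidable (Spec_lst_to_snippets lst out) := by unfold Spec_lst_to_snippets; infer_instance

-- ===== CLAIM (what is proved, stated in full; the proofs are below) =====
def Claim_equal_lst_to_snippets : Prop := ∀ (lst : List String), Dom_lst_to_snippets lst → Spec_lst_to_snippets lst (lst_to_snippets lst)

-- ===== LEMMAS AND PROOFS =====

-- prepend a string onto the first segment (the partial-accumulator view of A)
def pvConsHead (s : String) : List String → List String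
  | [] => [s]
  | h :: r => (s ++ h) :: r

theorem pvRender_prefix (g : List String) (s : String) :
    g.foldl (fun a t => a ++ t ++ " ") s = s ++ pvRender g := by
  induction g generalizing s with
  | nil => simp [pvRender]
  | cons t g ih =>
      simp only [pvRender, List.foldl_cons] at *
      rw [ih, ih (s := "" ++ t ++ " ")]
      simp [String.append_assoc]

theorem pvRender_cons (t : String) (g : List String) :
    pvRender (t :: g) = t ++ " " ++ pvRender g := by
  rw [pvRender, List.foldl_cons, pvRender_prefix]
  simp [String.append_assoc]

theorem pvSegsB_ne_nil (toks : List String) : pvSegsB toks ≠ [] := by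
  unfold pvSegsB
  split <;> simp

theorem pvSegsB_cons_dots (ts : List String) :
    pvSegsB ("..." :: ts) = "" :: pvSegsB ts := by
  rw [pvSegsB]
  split
  · rename_i i h
    rw [PySem.List.index?_cons_self] at h
    cases h
    have h1 : ((0 : Nat) : Int) + 1 = ((1 : Nat) : Int) := by omega
    have h2 : (("..." :: ts).length : Int) = ((ts.length + 1 : Nat) : Int) := by
      simp
    rw [h1, h2, PySem.List.slice_natCast]
    simp [pvRender, PySem.List.slice_zero_start, PySem.List.slice_to]
  · rename_i h
    rw [PySem.List.index?_cons_self] at h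
    cases h

theorem pvSegsB_cons_ne (t : String) (ts : List String) (ht : t ≠ "...") :
    pvSegsB (t :: ts) = pvConsHead (t ++ " ") (pvSegsB ts) := by
  rw [pvSegsB, pvSegsB]
  have hidx : PySem.List.index? (t :: ts) "..." = (PySem.List.index? ts "...").map (· + 1) :=
    PySem.List.index?_cons_of_ne ts ht
  split
  · rename_i i h
    rw [hidx] at h
    cases hj : PySem.List.index? ts "..." with
    | none => rw [hj] at h; simp at h
    | some j =>
        rw [hj] at h
        simp only [Option.map_some] at h
        cases h
        split
        · rename_i j' h'
          cases h'
          -- slices on t :: ts vs slices on ts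
          have e1 : ((j + 1 : Nat) : Int) + 1 = ((j + 2 : Nat) : Int) := by omega
          have e2 : (((t :: ts).length : Nat) : Int) = ((ts.length + 1 : Nat) : Int) := by simp
          have e3 : ((j : Nat) : Int) + 1 = ((j + 1 : Nat) : Int) := by omega
          rw [e1, e2, e3, PySem.List.slice_natCast, PySem.List.slice_natCast]
          have e4 : PySem.List.slice (t :: ts) (some 0) (some ((j + 1 : Nat) : Int)) =
              (t :: ts).take (j + 1) := by
            rw [PySem.List.slice_zero_start, PySem.List.slice_to_natCast]
          have e5 : PySem.List.slice ts (some 0) (some ((j : Nat) : Int)) = ts.take j := by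
            rw [PySem.List.slice_zero_start, PySem.List.slice_to_natCast]
          rw [e4, e5]
          simp only [List.take_succ_cons, List.drop_succ_cons, pvConsHead]
          rw [List.cons.injEq]
          refine ⟨pvRender_cons t _, ?_⟩
          have e6 : ts.length + 1 - (j + 2) = ts.length - (j + 1) := by omega
          rw [e6]
        · rename_i h'
          cases h'
  · rename_i h
    rw [hidx] at h
    cases hj : PySem.List.index? ts "..." with
    | some j => rw [hj] at h; simp at h
    | none =>
        show [pvRender (t :: ts)] = pvConsHead (t ++ " ") [pvRender ts]
        simp [pvConsHead, pvRender_cons]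

theorem pvFoldA_eq (toks : List String) : ∀ (acc : List String) (s : String),
    (toks.foldl pvStepBit (acc, s)).1 ++ [(toks.foldl pvStepBit (acc, s)).2]
      = acc ++ pvConsHead s (pvSegsB toks) := by
  induction toks with
  | nil =>
      intro acc s
      simp [pvSegsB, PySem.List.index?_eq_idxOf?, pvRender, pvConsHead]
  | cons t ts ih =>
      intro acc s
      by_cases ht : t = "..."
      · subst ht
        have hstep : pvStepBit (acc, s) "..." = (acc ++ [s], "") := by simp [pvStepBit]
        simp only [List.foldl_cons, hstep]
        rw [ih (acc ++ [s]) ""]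
        rw [pvSegsB_cons_dots]
        cases hsegs : pvSegsB ts with
        | nil => exact absurd hsegs (pvSegsB_ne_nil ts)
        | cons h r => simp [pvConsHead]
      · simp only [List.foldl_cons, pvStepBit, if_pos ht]
        rw [ih acc (s ++ t ++ " ")]
        rw [pvSegsB_cons_ne t ts ht]
        cases hsegs : pvSegsB ts with
        | nil => exact absurd hsegs (pvSegsB_ne_nil ts)
        | cons h r => simp [pvConsHead, String.append_assoc]

theorem pv_fold_eq (lst : List String) : ∀ (acc : List String),
    lst.foldl (fun snippets article =>
      let r := (PySem.Str.split₀ article).foldl pvStepBit (snippets, "")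
      r.1 ++ [r.2]) acc
    = lst.foldl (fun snippets article => snippets ++ pvSegsB (PySem.Str.split₀ article)) acc := by
  induction lst with
  | nil => intro acc; rfl
  | cons a l ih =>
      intro acc
      simp only [List.foldl_cons]
      rw [pvFoldA_eq]
      have : pvConsHead "" (pvSegsB (PySem.Str.split₀ a)) = pvSegsB (PySem.Str.split₀ a) := by
        cases hsegs : pvSegsB (PySem.Str.split₀ a) with
        | nil => exact absurd hsegs (pvSegsB_ne_nil _)
        | cons h r => simp [pvConsHead]
      rw [this, ih]

-- ===== VERDICT (by name: the statement is the Claim_ definition above) =====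
theorem lst_to_snippets_spec : Claim_equal_lst_to_snippets := by
  intro lst _
  unfold Spec_lst_to_snippets lst_to_snippets lst_to_snippets_alt
  exact pv_fold_eq lst []
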